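-- pv_equiv track=rewrite | github.com/ethyl2/code_challenges | grocery_tills.py | queue_time_recursive
-- ===== SOURCE A (Python) =====
-- def queue_time_recursive(customers, n, tills=None):
--     if len(customers) == 0:
--         if tills is not None:
--             current_max = max(tills.keys(), key=(lambda k: tills[k]))
--             return tills[current_max]
--         return 0
--     if tills is None:
--         tills = {}
--     if len(tills) == 0:
--         if n > 1:
--             for i in range(n):
--                 tills[i] = 0
--         else:
--             tills[0] = 0
--     current_key = min(tills.keys(), key=(lambda k: tills[k]))
--     tills[current_key] += customers[0]
--     return queue_time_recursive(customers[1:], n, tills)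
-- ===== SOURCE B (Python) =====
-- from bisect import insort
--
-- def queue_time_recursive(customers, n, tills=None):
--     if tills:
--         pool = sorted((load, i) for i, load in enumerate(tills.values()))
--     elif customers:
--         pool = [(0, i) for i in range(n if n > 1 else 1)]
--     else:
--         return 0
--     for c in customers:
--         load, i = pool.pop(0)
--         insort(pool, (load + c, i))
--     return max(pool)[0]
-- ===== Notes on version B (the rewrite author's own statement) =====
-- stated objective: faster
-- what changed: Replaces A's recursion (which re-slices the customer list and does a Python-level min-scan over the whole till dict for every customer) by one iterative pass that keeps the tills as a list of (load, index) pairs kept sorted with bisect.insort, so the least-loaded till is always the head of the pool.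
import Mathlib
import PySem

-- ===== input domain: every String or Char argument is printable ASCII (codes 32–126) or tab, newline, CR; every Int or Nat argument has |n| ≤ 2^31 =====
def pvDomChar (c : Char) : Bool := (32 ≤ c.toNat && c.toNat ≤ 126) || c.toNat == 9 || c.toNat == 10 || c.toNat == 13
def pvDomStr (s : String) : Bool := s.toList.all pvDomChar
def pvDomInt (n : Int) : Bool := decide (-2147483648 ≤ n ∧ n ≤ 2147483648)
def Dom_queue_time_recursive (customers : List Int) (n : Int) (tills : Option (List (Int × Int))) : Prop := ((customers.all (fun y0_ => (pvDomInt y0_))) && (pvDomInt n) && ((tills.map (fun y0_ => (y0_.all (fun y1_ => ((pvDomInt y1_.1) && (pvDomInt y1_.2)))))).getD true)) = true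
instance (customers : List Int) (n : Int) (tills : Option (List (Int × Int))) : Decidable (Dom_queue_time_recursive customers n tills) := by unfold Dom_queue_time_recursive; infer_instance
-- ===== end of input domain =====

-- B replaces A's per-customer linear min-scan over the till dict (plus O(m^2) list slicing and
-- recursion) by a sorted pool of (load, index) pairs maintained with bisect.insort; return value
-- only — A mutates the caller's tills dict in place, B does not.

-- ===== PORT A =====
-- literal transliteration of Source A; tills[k] lookups are getD _ 0 (the key is always present, so
-- Python's KeyError is unreachable); the `none` arms are where Python raises (excluded by Pre_)
-- or are unreachable.
def queue_time_recursive (customers : List Int) (n : Int) (tills : Option (List (Int × Int))) : Int :=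
  match customers with
  | [] =>
    match tills with
    | some t =>
      let d : PySem.Dict Int Int := PySem.Dict.mk t
      match PySem.List.max? d.keys (fun k => d.getD k 0) with
      | some k => d.getD k 0
      | none => 0            -- Python: max() of an empty dict raises ValueError; excluded by Pre_
    | none => 0
  | c :: rest =>
    let d0 : PySem.Dict Int Int :=
      match tills with
      | some t => PySem.Dict.mk t
      | none => PySem.Dict.mk []          -- tills = {}
    let d : PySem.Dict Int Int :=
      if d0.size = 0 then
        (if n > 1 then (PySem.List.pyRange 0 n 1).foldl (fun d i => d.insert i 0) d0
         else d0.insert 0 0)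
      else d0
    match PySem.List.min? d.keys (fun k => d.getD k 0) with
    | some k => queue_time_recursive rest n (some ((d.modify k 0 (fun v => v + c)).items))
    | none => 0              -- unreachable: d is nonempty here

-- ===== PORT B =====
-- literal transliteration of Source B
-- tuple comparison (load, i) in Python is lexicographic:
def lexLtB (a b : Int × Int) : Bool := decide (a.1 < b.1) || (!decide (b.1 < a.1) && decide (a.2 < b.2))

-- hand port of bisect.insort on (load, i) pairs: insert before the first strictly greater element;
-- exact, since insort inserts after elements that are ≤ the new one.
-- the loop over customers + final max(pool)[0] of Source B:
def pvRun (cs : List Int) (pool : List (Int × Int)) : Int :=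
  let final := cs.foldl (fun pool c =>
      match pool with
      | [] => []             -- unreachable: the pool is never empty when the loop runs
      | p :: rest => PySem.List.insertBy lexLtB (p.1 + c, p.2) rest) pool
  match PySem.List.max2? final Prod.fst Prod.snd with
  | some m => m.1
  | none => 0                -- unreachable: final is nonempty

def queue_time_recursive_alt (customers : List Int) (n : Int) (tills : Option (List (Int × Int))) : Int :=
  match tills with
  | some (q :: qs) =>         -- "if tills:" — a nonempty dict
    pvRun customers
      (PySem.List.sorted2
        ((PySem.List.enumerate (PySem.Dict.mk (q :: qs)).values 0).map (fun p => (p.2, p.1)))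
        Prod.fst Prod.snd)
  | _ =>
    match customers with
    | [] => 0
    | _ :: _ =>               -- "elif customers:"
      pvRun customers ((PySem.List.pyRange 0 (if n > 1 then n else 1) 1).map (fun i => ((0 : Int), i)))

-- ===== PRECONDITION & SPEC =====
-- Pre_ excludes (a) the crash: customers empty together with an empty dict passed for tills, where
-- A's max() raises ValueError, and (b) association lists with a repeated key, which do not
-- represent any Python dict (a Python dict has unique keys, so A never receives such an input).
def Pre_queue_time_recursive (customers : List Int) (n : Int) (tills : Option (List (Int × Int))) : Prop :=
  (customers = [] → tills ≠ some []) ∧ ((tills.getD []).map Prod.fst).Nodup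
instance (customers : List Int) (n : Int) (tills : Option (List (Int × Int))) : Decidable (Pre_queue_time_recursive customers n tills) := by unfold Pre_queue_time_recursive; infer_instance

def pvWitness_queue_time_recursive : List Int × Int × (Option (List (Int × Int))) := ([5, 3, 2], 2, none)

def Spec_queue_time_recursive (customers : List Int) (n : Int) (tills : Option (List (Int × Int))) (out : Int) : Prop := out = queue_time_recursive_alt customers n tills
instance (customers : List Int) (n : Int) (tills : Option (List (Int × Int))) (out : Int) : Decidable (Spec_queue_time_recursive customers n tills out) := by unfold Spec_queue_time_recursive; infer_instance

-- ===== CLAIM (what is proved, stated in full; the proofs are below) =====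
def Claim_equal_queue_time_recursive : Prop := ∀ (customers : List Int) (n : Int) (tills : Option (List (Int × Int))), Dom_queue_time_recursive customers n tills → Pre_queue_time_recursive customers n tills → Spec_queue_time_recursive customers n tills (queue_time_recursive customers n tills)



-- ===== LEMMAS AND PROOFS =====

-- reference enumeration [(vs[0], s), (vs[1], s+1), …] of the loads of the tills
def enum2 : List Int → Int → List (Int × Int)
  | [], _ => []
  | v :: t, s => (v, s) :: enum2 t (s + 1)

lemma enumerate_swap (vs : List Int) (s : Int) :
    (PySem.List.enumerate vs s).map (fun p => (p.2, p.1)) = enum2 vs s := by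
  induction vs generalizing s with
  | nil => rfl
  | cons v t ih => simp [PySem.List.enumerate, enum2, ih]

lemma enum2_length (vs : List Int) (s : Int) : (enum2 vs s).length = vs.length := by
  induction vs generalizing s with
  | nil => rfl
  | cons v t ih => simp [enum2, ih]

lemma enum2_getElem (vs : List Int) (s : Int) (i : Nat) (h : i < vs.length) :
    (enum2 vs s)[i]'(by rw [enum2_length]; exact h) = (vs[i], s + (i : Int)) := by
  induction vs generalizing s i with
  | nil => simp at h
  | cons v t ih =>
    cases i with
    | zero => simp [enum2]
    | succ j =>
      have := ih (s + 1) j (by simpa using h)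
      simp only [enum2, List.getElem_cons_succ]
      rw [this]
      congr 1
      push_cast
      omega

lemma enum2_mem {vs : List Int} {s : Int} {y : Int × Int} :
    y ∈ enum2 vs s ↔ ∃ j : Nat, ∃ _ : j < vs.length, y = (vs[j], s + (j : Int)) := by
  rw [List.mem_iff_getElem]
  constructor
  · rintro ⟨j, hj, hy⟩
    have hj' : j < vs.length := by rw [enum2_length] at hj; exact hj
    exact ⟨j, hj', by rw [← hy, enum2_getElem vs s j hj']⟩
  · rintro ⟨j, hj, hy⟩
    exact ⟨j, by rw [enum2_length]; exact hj, by rw [enum2_getElem vs s j hj, hy]⟩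

lemma enum2_snd_lt (vs : List Int) (s : Int) :
    (enum2 vs s).Pairwise (fun a b => a.2 < b.2) := by
  induction vs generalizing s with
  | nil => simp [enum2]
  | cons v t ih =>
    refine List.Pairwise.cons ?_ (ih (s + 1))
    intro y hy
    rcases enum2_mem.mp hy with ⟨j, hj, rfl⟩
    simp; omega

lemma enum2_set (vs : List Int) (s : Int) (j : Nat) (w : Int) (h : j < vs.length) :
    enum2 (vs.set j w) s = (enum2 vs s).set j (w, s + (j : Int)) := by
  induction vs generalizing s j with
  | nil => simp at h
  | cons v t ih =>
    cases j with
    | zero => simp [enum2]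
    | succ k =>
      simp only [List.set_cons_succ, enum2]
      rw [ih (s + 1) k (by simpa using h)]
      have hc : s + 1 + (k : Int) = s + ((k : Nat) + 1 : Nat) := by push_cast; omega
      rw [hc]

lemma enum2_map_fst (vs : List Int) (s : Int) : (enum2 vs s).map Prod.fst = vs := by
  induction vs generalizing s with
  | nil => rfl
  | cons v t ih => simp [enum2, ih]

-- the foldl step of PySem.List.min?
def pvMinStep {A : Type} (f : A → Int) (acc : Option A) (x : A) : Option A :=
  match acc with
  | none => some x
  | some m => if f x < f m then some x else some m

lemma min?_eq_foldl {A : Type} (l : List A) (f : A → Int) :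
    PySem.List.min? l f = l.foldl (pvMinStep f) none := rfl

lemma foldl_min_keep {A : Type} (f : A → Int) (t : List A) (m : A)
    (h : ∀ x ∈ t, ¬ (f x < f m)) :
    t.foldl (pvMinStep f) (some m) = some m := by
  induction t with
  | nil => rfl
  | cons a t ih =>
    simp only [List.foldl_cons, pvMinStep]
    rw [if_neg (h a (by simp))]
    exact ih (fun x hx => h x (by simp [hx]))

lemma foldl_min_from {A : Type} (f : A → Int) (t : List A) (m : A) (j : Nat) (hj : j < t.length)
    (hlt : f (t[j]) < f m)
    (hle : ∀ i (hi : i < t.length), f t[j] ≤ f t[i])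
    (hst : ∀ i (hi : i < t.length), i < j → f t[j] < f t[i]) :
    t.foldl (pvMinStep f) (some m) = some t[j] := by
  induction t generalizing m j with
  | nil => simp at hj
  | cons a t ih =>
    cases j with
    | zero =>
      simp only [List.getElem_cons_zero] at hlt hle ⊢
      simp only [List.foldl_cons, pvMinStep]
      rw [if_pos hlt]
      refine foldl_min_keep f t a ?_
      intro x hx
      rcases List.mem_iff_getElem.mp hx with ⟨i, hi, rfl⟩
      have := hle (i + 1) (by simpa using Nat.succ_lt_succ hi)
      simpa using this
    | succ k =>
      have hk : k < t.length := by simpa using hj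
      have ha : f ((a :: t)[k + 1]) < f a := hst 0 (by simp) (by omega)
      simp only [List.getElem_cons_succ] at hlt ha ⊢
      simp only [List.foldl_cons, pvMinStep]
      split
      · exact ih a k hk ha
          (fun i hi => by simpa using hle (i + 1) (by simpa using Nat.succ_lt_succ hi))
          (fun i hi hik => by simpa using hst (i + 1) (by simpa using Nat.succ_lt_succ hi) (by omega))
      · exact ih m k hk hlt
          (fun i hi => by simpa using hle (i + 1) (by simpa using Nat.succ_lt_succ hi))
          (fun i hi hik => by simpa using hst (i + 1) (by simpa using Nat.succ_lt_succ hi) (by omega))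

lemma min?_first {A : Type} (f : A → Int) (l : List A) (j : Nat) (hj : j < l.length)
    (hle : ∀ i (hi : i < l.length), f l[j] ≤ f l[i])
    (hst : ∀ i (hi : i < l.length), i < j → f l[j] < f l[i]) :
    PySem.List.min? l f = some l[j] := by
  cases l with
  | nil => simp at hj
  | cons a t =>
    rw [min?_eq_foldl]
    simp only [List.foldl_cons]
    have hstep : pvMinStep f none a = some a := rfl
    rw [hstep]
    cases j with
    | zero =>
      simp only [List.getElem_cons_zero] at *
      refine foldl_min_keep f t a ?_
      intro x hx
      rcases List.mem_iff_getElem.mp hx with ⟨i, hi, rfl⟩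
      have := hle (i + 1) (by simpa using Nat.succ_lt_succ hi)
      simpa using this
    | succ k =>
      have hk : k < t.length := by simpa using hj
      have ha : f ((a :: t)[k + 1]) < f a := hst 0 (by simp) (by omega)
      simp only [List.getElem_cons_succ] at ha ⊢
      exact foldl_min_from f t a k hk ha
        (fun i hi => by simpa using hle (i + 1) (by simpa using Nat.succ_lt_succ hi))
        (fun i hi hik => by simpa using hst (i + 1) (by simpa using Nat.succ_lt_succ hi) (by omega))

-- the foldl step of PySem.List.max2? at keys fst/snd
def pvMaxStep (acc : Option (Int × Int)) (x : Int × Int) : Option (Int × Int) :=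
  match acc with
  | none => some x
  | some m => if (decide (m.1 < x.1) || !decide (x.1 < m.1) && decide (m.2 < x.2)) = true then some x else some m

lemma max2?_eq_foldl (l : List (Int × Int)) :
    PySem.List.max2? l Prod.fst Prod.snd = l.foldl pvMaxStep none := by
  unfold PySem.List.max2?
  congr 1
  funext acc x
  cases acc <;> rfl

lemma foldl_max2_spec (t : List (Int × Int)) (m : Int × Int) :
    ∃ r, t.foldl pvMaxStep (some m) = some r ∧ (r = m ∨ r ∈ t) ∧ m.1 ≤ r.1 ∧ ∀ y ∈ t, y.1 ≤ r.1 := by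
  induction t generalizing m with
  | nil => exact ⟨m, rfl, Or.inl rfl, le_refl _, by simp⟩
  | cons a t ih =>
    simp only [List.foldl_cons, pvMaxStep]
    split
    · rename_i hcond
      rcases ih a with ⟨r, hfold, hmem, hle, hall⟩
      have hma : m.1 ≤ a.1 := by
        simp only [Bool.or_eq_true, Bool.and_eq_true, Bool.not_eq_true', decide_eq_true_eq,
          decide_eq_false_iff_not] at hcond
        omega
      refine ⟨r, hfold, ?_, le_trans hma hle, ?_⟩
      · rcases hmem with h | h
        · exact Or.inr (by simp [h])
        · exact Or.inr (by simp [h])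
      · intro y hy
        rcases List.mem_cons.mp hy with rfl | hy
        · exact hle
        · exact hall y hy
    · rcases ih m with ⟨r, hfold, hmem, hle, hall⟩
      rename_i hcond
      have hma : a.1 ≤ m.1 := by
        simp only [Bool.or_eq_true, Bool.and_eq_true, Bool.not_eq_true', decide_eq_true_eq,
          decide_eq_false_iff_not] at hcond
        omega
      refine ⟨r, hfold, ?_, hle, ?_⟩
      · rcases hmem with h | h
        · exact Or.inl h
        · exact Or.inr (by simp [h])
      · intro y hy
        rcases List.mem_cons.mp hy with rfl | hy
        · exact le_trans hma hle
        · exact hall y hy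

lemma max2?_spec (l : List (Int × Int)) (hl : l ≠ []) :
    ∃ m, PySem.List.max2? l Prod.fst Prod.snd = some m ∧ m ∈ l ∧ ∀ y ∈ l, y.1 ≤ m.1 := by
  cases l with
  | nil => exact absurd rfl hl
  | cons a t =>
    rw [max2?_eq_foldl]
    simp only [List.foldl_cons]
    have hstep : pvMaxStep none a = some a := rfl
    rw [hstep]
    rcases foldl_max2_spec t a with ⟨r, hfold, hmem, hle, hall⟩
    refine ⟨r, hfold, ?_, ?_⟩
    · rcases hmem with rfl | h
      · simp
      · simp [h]
    · intro y hy
      rcases List.mem_cons.mp hy with rfl | hy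
      · exact hle
      · exact hall y hy

-- lexLtB facts
lemma lexLt_iff (a b : Int × Int) :
    lexLtB a b = true ↔ (a.1 < b.1 ∨ (¬ b.1 < a.1 ∧ a.2 < b.2)) := by
  simp [lexLtB]

lemma lexLt_trans {a b c : Int × Int} (h1 : lexLtB a b = true) (h2 : lexLtB b c = true) :
    lexLtB a c = true := by
  rw [lexLt_iff] at *; omega

lemma lexLt_conn {a b : Int × Int} (h : a.2 ≠ b.2) :
    lexLtB a b = true ∨ lexLtB b a = true := by
  rw [lexLt_iff, lexLt_iff]; omega

-- insertBy facts
lemma insertBy_perm (lt : Int × Int → Int × Int → Bool) (x : Int × Int) (l : List (Int × Int)) :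
    (PySem.List.insertBy lt x l).Perm (x :: l) := by
  induction l with
  | nil => simp [PySem.List.insertBy]
  | cons y ys ih =>
    simp only [PySem.List.insertBy]
    split
    · exact List.Perm.refl _
    · exact (ih.cons y).trans (List.Perm.swap x y ys)

lemma insertBy_pairwise (x : Int × Int) (l : List (Int × Int))
    (hp : l.Pairwise (fun a b => lexLtB a b = true))
    (hc : ∀ y ∈ l, lexLtB x y = true ∨ lexLtB y x = true) :
    (PySem.List.insertBy lexLtB x l).Pairwise (fun a b => lexLtB a b = true) := by
  induction l with
  | nil => simp [PySem.List.insertBy]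
  | cons y ys ih =>
    rcases List.pairwise_cons.mp hp with ⟨hy, hys⟩
    simp only [PySem.List.insertBy]
    split
    · rename_i hxy
      refine List.Pairwise.cons ?_ hp
      intro z hz
      rcases List.mem_cons.mp hz with rfl | hz
      · exact hxy
      · exact lexLt_trans hxy (hy z hz)
    · rename_i hxy
      refine List.Pairwise.cons ?_ (ih hys (fun z hz => hc z (by simp [hz])))
      intro z hz
      rcases (PySem.List.mem_insertBy _ _ _ _).mp hz with rfl | hz
      · rcases hc y (by simp) with h | h
        · exact absurd h hxy
        · exact h
      · exact hy z hz

lemma sorted2_eq_foldl (xs : List (Int × Int)) :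
    PySem.List.sorted2 xs Prod.fst Prod.snd =
      xs.foldl (fun acc x => PySem.List.insertBy lexLtB x acc) [] := rfl

lemma foldl_insertBy_sorted (xs : List (Int × Int)) :
    ∀ acc : List (Int × Int),
      acc.Pairwise (fun a b => lexLtB a b = true) →
      ((acc ++ xs).map Prod.snd).Nodup →
      (xs.foldl (fun acc x => PySem.List.insertBy lexLtB x acc) acc).Pairwise
        (fun a b => lexLtB a b = true) := by
  induction xs with
  | nil => intro acc hp _; simpa using hp
  | cons x t ih =>
    intro acc hp hnd
    simp only [List.foldl_cons]
    have hsep : ∀ y ∈ acc, y.2 ≠ x.2 := by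
      intro y hy
      have h1 : y.2 ∈ acc.map Prod.snd := List.mem_map_of_mem hy
      have h2 : x.2 ∈ (x :: t).map Prod.snd := by simp
      rw [List.map_append, List.nodup_append] at hnd
      intro he
      rw [he] at h1
      exact absurd rfl (hnd.2.2 _ h1 _ h2)
    refine ih (PySem.List.insertBy lexLtB x acc) ?_ ?_
    · exact insertBy_pairwise x acc hp
        (fun y hy => lexLt_conn (fun he => hsep y hy he.symm))
    · have hperm : (PySem.List.insertBy lexLtB x acc ++ t).Perm (acc ++ x :: t) := by
        refine ((insertBy_perm lexLtB x acc).append_right t).trans ?_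
        exact List.perm_middle.symm
      exact ((hperm.map Prod.snd).nodup_iff).mpr hnd

-- Dict helpers
lemma dict_mk_items (d : PySem.Dict Int Int) : PySem.Dict.mk d.items = d := by
  cases d; rfl

lemma dict_keys_eq (d : PySem.Dict Int Int) : d.keys = d.items.map Prod.fst := rfl

lemma dict_values_eq (d : PySem.Dict Int Int) : d.values = d.items.map Prod.snd := rfl

lemma getD_idx (d : PySem.Dict Int Int) (hnd : d.keys.Nodup) (j : Nat) (h : j < d.items.length) :
    d.getD (d.items[j].1) 0 = d.items[j].2 := by
  have hmem : (d.items[j].1, d.items[j].2) ∈ d.items := by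
    have hm : d.items[j] ∈ d.items := List.getElem_mem h
    simp only [Prod.mk.eta]
    exact hm
  exact PySem.Dict.getD_of_mem_items d hmem hnd 0

lemma map_getD_keys (d : PySem.Dict Int Int) (hnd : d.keys.Nodup) :
    d.keys.map (fun k => d.getD k 0) = d.values := by
  rw [dict_keys_eq, dict_values_eq, List.map_map]
  refine List.map_congr_left ?_
  intro p hp
  have hmem : (p.1, p.2) ∈ d.items := by simpa using hp
  exact PySem.Dict.getD_of_mem_items d hmem hnd 0

lemma modify_at (d : PySem.Dict Int Int) (hnd : d.keys.Nodup) (j : Nat)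
    (h : j < d.items.length) (c : Int) :
    (d.modify (d.items[j].1) 0 (fun v => v + c)).items =
      d.items.set j (d.items[j].1, d.items[j].2 + c) := by
  have hmod : d.modify (d.items[j].1) 0 (fun v => v + c) =
      d.insert (d.items[j].1) (d.items[j].2 + c) := by
    show d.insert _ ((fun v => v + c) (d.getD (d.items[j].1) 0)) = _
    rw [getD_idx d hnd j h]
  rw [hmod]
  have hk : d.items[j].1 ∈ d.keys := by
    rw [dict_keys_eq]
    exact List.mem_map_of_mem (List.getElem_mem h)
  have hcont : d.contains (d.items[j].1) = true :=
    (PySem.Dict.contains_iff_mem_keys d _).mpr hk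
  rw [PySem.Dict.items_insert_of_contains d _ hcont]
  apply List.ext_getElem
  · simp
  · intro i hi1 hi2
    have hi : i < d.items.length := by simpa using hi1
    rw [List.getElem_map]
    by_cases hij : i = j
    · subst hij
      rw [List.getElem_set_self]
      simp
    · have hter : d.items[i].1 ≠ d.items[j].1 := by
        intro he
        have hkeys : d.keys[i]'(by simpa [dict_keys_eq] using hi) =
            d.keys[j]'(by simpa [dict_keys_eq] using h) := by
          simp only [dict_keys_eq, List.getElem_map]
          exact he
        exact hij (hnd.getElem_inj_iff.mp hkeys)
      rw [List.getElem_set_ne (fun he => hij he.symm)]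
      simp [hter]

-- head of the sorted pool is the first minimal-load till, and is what A's min? picks
lemma head_facts (d : PySem.Dict Int Int) (hnd : d.keys.Nodup) (p : Int × Int)
    (tail : List (Int × Int))
    (hperm : (p :: tail).Perm (enum2 d.values 0))
    (hsort : (p :: tail).Pairwise (fun a b => lexLtB a b = true)) :
    ∃ j : Nat, ∃ _ : j < d.items.length,
      p = (d.items[j].2, (j : Int)) ∧
      PySem.List.min? d.keys (fun k => d.getD k 0) = some (d.items[j].1) := by
  have hlen : d.values.length = d.items.length := by simp [dict_values_eq]
  have hpmem : p ∈ enum2 d.values 0 := hperm.mem_iff.mp (by simp)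
  rcases enum2_mem.mp hpmem with ⟨j, hj, hp⟩
  have hall : ∀ y ∈ enum2 d.values 0, y = p ∨ lexLtB p y = true := by
    intro y hy
    have : y ∈ p :: tail := hperm.mem_iff.mpr hy
    rcases List.mem_cons.mp this with rfl | hmem
    · exact Or.inl rfl
    · exact Or.inr ((List.pairwise_cons.mp hsort).1 y hmem)
  have hle : ∀ i (hi : i < d.values.length), d.values[j] ≤ d.values[i] := by
    intro i hi
    rcases hall (d.values[i], (i : Int)) (enum2_mem.mpr ⟨i, hi, by simp⟩) with he | hlt
    · rw [hp, Prod.mk.injEq] at he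
      omega
    · rw [hp, lexLt_iff] at hlt
      simp at hlt
      omega
  have hst : ∀ i (hi : i < d.values.length), i < j → d.values[j] < d.values[i] := by
    intro i hi hij
    rcases hall (d.values[i], (i : Int)) (enum2_mem.mpr ⟨i, hi, by simp⟩) with he | hlt
    · rw [hp, Prod.mk.injEq] at he
      omega
    · rw [hp, lexLt_iff] at hlt
      simp at hlt
      omega
  have hjlen : j < d.items.length := by omega
  have hkeyslen : d.keys.length = d.items.length := by simp [dict_keys_eq]
  have hgetd : ∀ i (hi : i < d.keys.length),
      d.getD (d.keys[i]) 0 = d.values[i]'(by omega) := by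
    intro i hi
    have hii : i < d.items.length := by omega
    have h1 : d.keys[i] = d.items[i].1 := by simp [dict_keys_eq]
    have h2 : d.values[i]'(by omega) = d.items[i].2 := by simp [dict_values_eq]
    rw [h1, h2]
    exact getD_idx d hnd i hii
  have hmin : PySem.List.min? d.keys (fun k => d.getD k 0) = some (d.keys[j]'(by omega)) := by
    refine min?_first (fun k => d.getD k 0) d.keys j (by omega) ?_ ?_
    · intro i hi
      show d.getD (d.keys[j]'(by omega)) 0 ≤ d.getD (d.keys[i]'hi) 0
      rw [hgetd j (by omega), hgetd i hi]
      exact hle i (by omega)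
    · intro i hi hij
      show d.getD (d.keys[j]'(by omega)) 0 < d.getD (d.keys[i]'hi) 0
      rw [hgetd j (by omega), hgetd i hi]
      exact hst i (by omega) hij
  refine ⟨j, hjlen, ?_, ?_⟩
  · rw [hp]
    have : d.values[j] = d.items[j].2 := by simp [dict_values_eq]
    rw [this]
    simp
  · rw [hmin]
    congr 1
    simp [dict_keys_eq]

-- the main simulation: A's recursion on (customers, d) equals B's loop on any
-- lex-sorted pool holding the same multiset of (load, index) pairs
lemma pvMain (cs : List Int) : ∀ (n : Int) (d : PySem.Dict Int Int) (pool : List (Int × Int)),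
    d.keys.Nodup → d.items ≠ [] →
    pool.Perm (enum2 d.values 0) →
    pool.Pairwise (fun a b => lexLtB a b = true) →
    queue_time_recursive cs n (some d.items) = pvRun cs pool := by
  induction cs with
  | nil =>
    intro n d pool hnd hne hperm hsort
    have hvne : d.values ≠ [] := by simpa [dict_values_eq] using hne
    have hpoolne : pool ≠ [] := by
      intro h
      rw [h] at hperm
      have := hperm.symm.eq_nil
      cases hv : d.values with
      | nil => exact hvne hv
      | cons a t => rw [hv] at this; simp [enum2] at this
    -- A side
    have hkne : d.keys ≠ [] := by simpa [dict_keys_eq] using hne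
    rcases hA : PySem.List.max? d.keys (fun k => d.getD k 0) with _ | k
    · exact absurd ((PySem.List.max?_eq_none_iff _ _).mp hA) hkne
    have hkmem : k ∈ d.keys := PySem.List.max?_mem hA
    have hkdom : ∀ y ∈ d.keys, d.getD y 0 ≤ d.getD k 0 := PySem.List.max?_isMax hA
    have haval : d.getD k 0 ∈ d.values := by
      rw [← map_getD_keys d hnd]
      exact List.mem_map_of_mem hkmem
    have hadom : ∀ v ∈ d.values, v ≤ d.getD k 0 := by
      intro v hv
      rw [← map_getD_keys d hnd] at hv
      rcases List.mem_map.mp hv with ⟨k', hk', rfl⟩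
      exact hkdom k' hk'
    -- B side
    rcases max2?_spec pool hpoolne with ⟨m, hB, hmmem, hmdom⟩
    have hbval : m.1 ∈ d.values := by
      have : m ∈ enum2 d.values 0 := hperm.mem_iff.mp hmmem
      rw [← enum2_map_fst d.values 0]
      exact List.mem_map_of_mem this
    have hbdom : ∀ v ∈ d.values, v ≤ m.1 := by
      intro v hv
      rw [← enum2_map_fst d.values 0] at hv
      rcases List.mem_map.mp hv with ⟨y, hy, rfl⟩
      exact hmdom y (hperm.mem_iff.mpr hy)
    have heq : d.getD k 0 = m.1 :=
      le_antisymm (hbdom _ haval) (hadom _ hbval)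
    show queue_time_recursive [] n (some d.items) = pvRun [] pool
    simp only [queue_time_recursive, pvRun, List.foldl_nil]
    rw [dict_mk_items, hA, hB]
    exact heq
  | cons c rest ih =>
    intro n d pool hnd hne hperm hsort
    cases pool with
    | nil =>
      exfalso
      have := hperm.symm.eq_nil
      have hvne : d.values ≠ [] := by simpa [dict_values_eq] using hne
      cases hv : d.values with
      | nil => exact hvne hv
      | cons a t => rw [hv] at this; simp [enum2] at this
    | cons p tail =>
    rcases head_facts d hnd p tail hperm hsort with ⟨j, hj, hp, hmin⟩
    -- A's step
    have hsz : ¬ (PySem.Dict.size (PySem.Dict.mk d.items) = 0) := by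
      rw [dict_mk_items]
      simp only [PySem.Dict.size]
      intro h
      exact hne (List.length_eq_zero_iff.mp h)
    have hAstep : queue_time_recursive (c :: rest) n (some d.items) =
        queue_time_recursive rest n
          (some ((d.modify (d.items[j].1) 0 (fun v => v + c)).items)) := by
      simp only [queue_time_recursive]
      rw [dict_mk_items] at hsz ⊢
      rw [if_neg hsz, hmin]
    -- structure of the modified dict
    set d' := d.modify (d.items[j].1) 0 (fun v => v + c) with hd'
    have hitems' : d'.items = d.items.set j (d.items[j].1, d.items[j].2 + c) :=
      modify_at d hnd j hj c
    have hkeys' : d'.keys = d.keys := by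
      rw [dict_keys_eq, hitems', List.map_set]
      show (d.items.map Prod.fst).set j (d.items[j].1) = d.keys
      rw [dict_keys_eq]
      have hjk : j < (d.items.map Prod.fst).length := by simpa using hj
      have hgj : d.items[j].1 = (d.items.map Prod.fst)[j]'hjk := by simp
      rw [hgj]
      exact List.set_getElem_self hjk
    have hvals' : d'.values = d.values.set j (d.items[j].2 + c) := by
      rw [dict_values_eq, hitems', List.map_set, dict_values_eq]
    have hne' : d'.items ≠ [] := by
      rw [hitems']
      intro h
      have hlen := congrArg List.length h
      rw [List.length_set] at hlen
      simp only [List.length_nil] at hlen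
      omega
    -- the new pool
    have hjv : j < d.values.length := by simpa [dict_values_eq] using hj
    set x : Int × Int := (p.1 + c, p.2) with hx
    have hLj : (enum2 d.values 0)[j]'(by rw [enum2_length]; exact hjv) = p := by
      rw [enum2_getElem d.values 0 j hjv, hp]
      have : d.values[j] = d.items[j].2 := by simp [dict_values_eq]
      rw [this]
      simp
    have henum' : enum2 d'.values 0 = (enum2 d.values 0).set j x := by
      rw [hvals', enum2_set d.values 0 j _ hjv, hx, hp]
      simp
    have hjL : j < (enum2 d.values 0).length := by rw [enum2_length]; exact hjv
    have hsplit : enum2 d.values 0 =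
        (enum2 d.values 0).take j ++ p :: (enum2 d.values 0).drop (j + 1) := by
      conv_lhs => rw [← List.take_append_drop j (enum2 d.values 0)]
      rw [List.drop_eq_getElem_cons hjL, hLj]
    have hsetTD : (enum2 d.values 0).set j x =
        (enum2 d.values 0).take j ++ x :: (enum2 d.values 0).drop (j + 1) :=
      List.set_eq_take_cons_drop x hjL
    have htail : tail.Perm ((enum2 d.values 0).take j ++ (enum2 d.values 0).drop (j + 1)) := by
      have hmid : (enum2 d.values 0).Perm
          (p :: ((enum2 d.values 0).take j ++ (enum2 d.values 0).drop (j + 1))) := by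
        conv_lhs => rw [hsplit]
        exact List.perm_middle
      exact (hperm.trans hmid).cons_inv
    have hperm' : (PySem.List.insertBy lexLtB x tail).Perm (enum2 d'.values 0) := by
      refine (insertBy_perm lexLtB x tail).trans ?_
      rw [henum', hsetTD]
      exact ((htail.cons x).trans List.perm_middle.symm)
    -- distinct snd components
    have hndsnd : ((p :: tail).map Prod.snd).Nodup := by
      have hL : ((enum2 d.values 0).map Prod.snd).Nodup := by
        have hpw := (enum2_snd_lt d.values 0).imp (fun h => ne_of_lt h)
        exact List.pairwise_map.mpr hpw
      exact ((hperm.map Prod.snd).nodup_iff).mpr hL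
    have hsort' : (PySem.List.insertBy lexLtB x tail).Pairwise
        (fun a b => lexLtB a b = true) := by
      refine insertBy_pairwise x tail (List.pairwise_cons.mp hsort).2 ?_
      intro y hy
      refine lexLt_conn ?_
      have hpnot : p.2 ∉ tail.map Prod.snd := (List.nodup_cons.mp (by simpa using hndsnd)).1
      intro he
      exact hpnot (by rw [hx] at he; rw [he]; exact List.mem_map_of_mem hy)
    have hBstep : pvRun (c :: rest) (p :: tail) = pvRun rest (PySem.List.insertBy lexLtB x tail) := rfl
    rw [hAstep, hBstep]
    exact ih n d' (PySem.List.insertBy lexLtB x tail) (hkeys' ▸ hnd) hne' hperm' hsort'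

-- the dict A builds when it is handed no (or an empty) till dict
def dInit (n : Int) : PySem.Dict Int Int :=
  if n > 1 then (PySem.List.pyRange 0 n 1).foldl (fun d i => d.insert i 0) (PySem.Dict.mk [])
  else (PySem.Dict.mk ([] : List (Int × Int))).insert 0 0

lemma pyRange01 (n : Int) (h : n > 1) :
    PySem.List.pyRange 0 n 1 = (List.range n.toNat).map (fun k : Nat => (k : Int)) := by
  simp only [PySem.List.pyRange]
  rw [if_neg (by norm_num)]
  have h1 : (0 : Int) < 1 := by norm_num
  rw [if_pos h1, if_pos (by omega : (0 : Int) < n)]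
  have h2 : ((n - 0 + 1 - 1) / 1) = n := by omega
  rw [h2]
  refine List.map_congr_left ?_
  intro k _
  omega

lemma dInit_items (n : Int) :
    (dInit n).items = (List.range (if n > 1 then n.toNat else 1)).map
      (fun k : Nat => ((k : Int), (0 : Int))) := by
  unfold dInit
  split
  · rename_i h
    rw [pyRange01 n h]
    have hfresh : ∀ a ∈ (List.range n.toNat).map (fun k : Nat => (k : Int)),
        (PySem.Dict.mk ([] : List (Int × Int))).contains a = false := by
      intro a _; rfl
    have hinj : Function.Injective (fun k : Nat => (k : Int)) := by
      intro x y hxy; simpa using hxy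
    have hnd : (((List.range n.toNat).map (fun k : Nat => (k : Int))).map
        (fun a : Int => a)).Nodup := by
      rw [List.map_id']
      exact List.nodup_range.map hinj
    have hres := PySem.Dict.items_foldl_insert_fresh
      ((List.range n.toNat).map (fun k : Nat => (k : Int))) (fun a => a) (fun _ => (0 : Int))
      (PySem.Dict.mk []) hfresh hnd
    simp only at hres
    rw [hres]
    simp [List.map_map]
  · decide

lemma dInit_values (n : Int) :
    (dInit n).values = List.replicate (if n > 1 then n.toNat else 1) 0 := by
  rw [dict_values_eq, dInit_items, List.map_map]
  have hc : (Prod.snd ∘ fun k : Nat => ((k : Int), (0 : Int))) = fun _ : Nat => (0 : Int) := rfl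
  rw [hc, List.map_const']
  rw [List.length_range]

lemma dInit_keys_nodup (n : Int) : (dInit n).keys.Nodup := by
  rw [dict_keys_eq, dInit_items, List.map_map]
  have hc : (Prod.fst ∘ fun k : Nat => ((k : Int), (0 : Int))) = fun k : Nat => (k : Int) := rfl
  rw [hc]
  refine List.nodup_range.map ?_
  intro x y hxy
  simpa using hxy

lemma dInit_ne (n : Int) : (dInit n).items ≠ [] := by
  rw [dInit_items]
  intro h
  have hlen := congrArg List.length h
  simp only [List.length_map, List.length_range, List.length_nil] at hlen
  by_cases h1 : n > 1
  · rw [if_pos h1] at hlen; omega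
  · rw [if_neg h1] at hlen; omega

lemma enum2_replicate (m : Nat) (s : Int) :
    enum2 (List.replicate m 0) s =
      (List.range m).map (fun k : Nat => ((0 : Int), s + (k : Int))) := by
  induction m generalizing s with
  | zero => rfl
  | succ r ih =>
    rw [List.replicate_succ, List.range_succ_eq_map, List.map_cons]
    simp only [enum2]
    rw [ih (s + 1)]
    congr 1
    · simp
    · rw [List.map_map]
      refine List.map_congr_left ?_
      intro k _
      simp only [Function.comp_apply]
      congr 1
      push_cast
      omega

-- B's initial pool in the "no tills handed over" case, in canonical form
lemma pool0_eq (n : Int) :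
    (PySem.List.pyRange 0 (if n > 1 then n else 1) 1).map (fun i => ((0 : Int), i)) =
      (List.range (if n > 1 then n.toNat else 1)).map (fun k : Nat => ((0 : Int), (k : Int))) := by
  by_cases h : n > 1
  · rw [if_pos h, if_pos h, pyRange01 n h, List.map_map]
    rfl
  · rw [if_neg h, if_neg h]
    decide

lemma pool0_pairwise (n : Int) :
    ((List.range (if n > 1 then n.toNat else 1)).map
        (fun k : Nat => ((0 : Int), (k : Int)))).Pairwise
      (fun a b => lexLtB a b = true) := by
  refine List.pairwise_map.mpr ?_
  refine List.pairwise_lt_range.imp ?_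
  intro a b hab
  rw [lexLt_iff]
  right
  refine ⟨by omega, ?_⟩
  simp only
  exact_mod_cast hab

lemma pool0_perm (n : Int) :
    ((List.range (if n > 1 then n.toNat else 1)).map
        (fun k : Nat => ((0 : Int), (k : Int)))).Perm
      (enum2 (dInit n).values 0) := by
  rw [dInit_values, enum2_replicate]
  simp only [zero_add]
  exact List.Perm.refl _


-- A treats tills=None, tills={} alike (both end up initialising the same dict)
lemma A_none_eq_some_nil (c : Int) (rest : List Int) (n : Int) :
    queue_time_recursive (c :: rest) n none = queue_time_recursive (c :: rest) n (some []) := rfl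

lemma A_init (c : Int) (rest : List Int) (n : Int) :
    queue_time_recursive (c :: rest) n (some []) =
      queue_time_recursive (c :: rest) n (some (dInit n).items) := by
  have hsz0 : PySem.Dict.size (PySem.Dict.mk ([] : List (Int × Int))) = 0 := rfl
  have hszI : ¬ (PySem.Dict.size (PySem.Dict.mk ((dInit n).items)) = 0) := by
    rw [dict_mk_items]
    simp only [PySem.Dict.size]
    intro h
    exact dInit_ne n (List.length_eq_zero_iff.mp h)
  simp only [queue_time_recursive]
  rw [dict_mk_items, if_pos hsz0, if_neg hszI]
  rfl

-- the nonempty-dict entry: B's sorted initial pool satisfies the invariant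
lemma entry_some (customers : List Int) (n : Int) (q : Int × Int) (qs : List (Int × Int))
    (hnd : ((q :: qs).map Prod.fst).Nodup) :
    queue_time_recursive customers n (some (q :: qs)) =
      queue_time_recursive_alt customers n (some (q :: qs)) := by
  set d : PySem.Dict Int Int := PySem.Dict.mk (q :: qs) with hd
  have hitems : d.items = q :: qs := rfl
  have hndk : d.keys.Nodup := hnd
  have hne : d.items ≠ [] := by rw [hitems]; simp
  have hE : (PySem.List.enumerate d.values 0).map (fun p => (p.2, p.1)) = enum2 d.values 0 :=
    enumerate_swap d.values 0
  have hperm : (PySem.List.sorted2 (enum2 d.values 0) Prod.fst Prod.snd).Perm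
      (enum2 d.values 0) := PySem.List.sorted2_perm _ _ _ _
  have hsort : (PySem.List.sorted2 (enum2 d.values 0) Prod.fst Prod.snd).Pairwise
      (fun a b => lexLtB a b = true) := by
    rw [sorted2_eq_foldl]
    refine foldl_insertBy_sorted (enum2 d.values 0) [] (by simp) ?_
    simp only [List.nil_append]
    have hpw := (enum2_snd_lt d.values 0).imp (fun h => ne_of_lt h)
    exact List.pairwise_map.mpr hpw
  have hB : queue_time_recursive_alt customers n (some (q :: qs)) =
      pvRun customers (PySem.List.sorted2 (enum2 d.values 0) Prod.fst Prod.snd) := by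
    simp only [queue_time_recursive_alt]
    rw [← hd, hE]
  rw [hB, ← hitems]
  exact pvMain customers n d _ hndk hne hperm hsort

-- the no-dict entry
lemma entry_init (c : Int) (rest : List Int) (n : Int) :
    queue_time_recursive (c :: rest) n (some []) =
      pvRun (c :: rest) ((PySem.List.pyRange 0 (if n > 1 then n else 1) 1).map
        (fun i => ((0 : Int), i))) := by
  rw [A_init, pool0_eq]
  exact pvMain (c :: rest) n (dInit n) _ (dInit_keys_nodup n) (dInit_ne n)
    (pool0_perm n) (pool0_pairwise n)

-- ===== VERDICT (by name: the statement is the Claim_ definition above) =====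
theorem queue_time_recursive_spec : Claim_equal_queue_time_recursive := by
  unfold Claim_equal_queue_time_recursive
  intro customers n tills _ hpre
  unfold Spec_queue_time_recursive
  match tills with
  | some (q :: qs) =>
    exact entry_some customers n q qs hpre.2
  | some [] =>
    match customers with
    | [] => exact absurd rfl (hpre.1 rfl)
    | c :: rest => exact entry_init c rest n
  | none =>
    match customers with
    | [] => rfl
    | c :: rest => exact (A_none_eq_some_nil c rest n).trans (entry_init c rest n)
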